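-- pv_equiv track=rewrite | github.com/Seorins/TIL | Algorithm/problem/swea4014.py | check
-- ===== SOURCE A (Python) =====
-- def check(board, n, x):
--     visited = [False] * n # 경사로 설치 여부 체크
--
--     # 높이 차이가 2 이상이면 바로 불가능
--     for i in range(n-1):
--         if abs(board[i] - board[i+1]) >= 2:
--             return False
--
--         # 오르막길
--         if board[i] < board[i+1]:
--             for j in range(x):
--                 if i-j<0 or board[i-j] != board[i] or visited[i-j]:
--                     return False
--                 visited[i-j] = True
--
--         # 내리막길
--         elif board[i] > board[i+1]:
--             for j in range(x):
--                 if i +1+j >=n or board[i+1+j] != board[i+1] or visited[i+1+j]: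
--                     return False
--                 visited[i+1+j] = True
--
--     return True
-- ===== SOURCE B (Python) =====
-- def check(board, n, x):
--     # Alternative algorithm: one right-to-left pass precomputes forward run lengths;
--     # one left-to-right pass tracks the reserved-through index R and the current
--     # backward run length, replacing the visited array and the inner marking loops
--     # with interval arithmetic per transition.
--     if n <= 1:
--         return True
--     b = board[:n]
--     fwd = [1] * n                 # fwd[i] = length of the equal-height run starting at i
--     for i in range(n - 2, -1, -1):
--         if b[i] == b[i + 1]:
--             fwd[i] = fwd[i + 1] + 1
--     R = -1                        # cells with index <= R are used/unavailable
--     run = 1                       # length of the equal-height run ending at i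
--     for i in range(n - 1):
--         d = b[i + 1] - b[i]
--         if d == 0:
--             run += 1
--         elif d == 1:
--             if run < x or R >= i - x + 1:
--                 return False
--             R = i
--             run = 1
--         elif d == -1:
--             if fwd[i + 1] < x:
--                 return False
--             R = i + x
--             run = 1
--         else:
--             return False
--     return True
-- ===== Notes on version B (the rewrite author's own statement) =====
-- stated objective: alternative
-- what changed: Replaces the visited array and the per-transition inner marking loops with a different algorithm: a right-to-left pass precomputing run lengths plus a left-to-right pass tracking one reserved-through index R and the current run length, deciding each slope transition by interval arithmetic.
-- outside the precondition, e.g. on check([0, 2], 5, 1): A returns False, B raises IndexError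
import Mathlib
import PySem

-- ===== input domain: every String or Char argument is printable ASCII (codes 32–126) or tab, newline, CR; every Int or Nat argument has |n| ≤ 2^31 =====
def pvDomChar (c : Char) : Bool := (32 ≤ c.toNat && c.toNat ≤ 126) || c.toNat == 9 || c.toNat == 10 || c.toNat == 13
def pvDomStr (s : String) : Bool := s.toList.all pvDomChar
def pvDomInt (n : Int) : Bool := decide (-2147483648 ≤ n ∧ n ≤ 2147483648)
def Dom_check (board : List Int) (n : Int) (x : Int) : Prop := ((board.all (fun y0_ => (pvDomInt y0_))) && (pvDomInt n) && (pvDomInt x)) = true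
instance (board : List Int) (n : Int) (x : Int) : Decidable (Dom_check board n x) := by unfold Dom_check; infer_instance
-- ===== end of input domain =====

-- B replaces A's visited array and inner marking loops with a different algorithm:
-- precomputed forward run lengths plus a reserved-through index R; same return value on Pre_.

-- ===== PORT A =====
-- uphill inner loop: for j in range(x): fail, or mark visited[i-j]
def aUp (board : List Int) (i : Int) : List Bool → List Int → Option (List Bool)
  | visited, [] => some visited
  | visited, j :: js =>
    if i - j < 0 ∨ PySem.List.pyGetD board (i - j) 0 ≠ PySem.List.pyGetD board i 0
        ∨ PySem.List.pyGetD visited (i - j) false = true then none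
    else aUp board i (visited.set (i - j).toNat true) js

-- downhill inner loop: for j in range(x): fail, or mark visited[i+1+j]
def aDown (board : List Int) (n i : Int) : List Bool → List Int → Option (List Bool)
  | visited, [] => some visited
  | visited, j :: js =>
    if n ≤ i + 1 + j ∨ PySem.List.pyGetD board (i + 1 + j) 0 ≠ PySem.List.pyGetD board (i + 1) 0
        ∨ PySem.List.pyGetD visited (i + 1 + j) false = true then none
    else aDown board n i (visited.set (i + 1 + j).toNat true) js

-- main loop: for i in range(n-1)
def aMain (board : List Int) (n x : Int) : List Bool → List Int → Bool
  | _, [] => true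
  | visited, i :: is =>
    if 2 ≤ (PySem.List.pyGetD board i 0 - PySem.List.pyGetD board (i + 1) 0).natAbs then false
    else if PySem.List.pyGetD board i 0 < PySem.List.pyGetD board (i + 1) 0 then
      match aUp board i visited (PySem.List.pyRange 0 x 1) with
      | none => false
      | some v => aMain board n x v is
    else if PySem.List.pyGetD board (i + 1) 0 < PySem.List.pyGetD board i 0 then
      match aDown board n i visited (PySem.List.pyRange 0 x 1) with
      | none => false
      | some v => aMain board n x v is
    else aMain board n x visited is

def check (board : List Int) (n : Int) (x : Int) : Bool :=
  aMain board n x (List.replicate n.toNat false) (PySem.List.pyRange 0 (n - 1) 1)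

-- ===== PORT B =====
-- forward run lengths, built right to left (fwd[i] = fwd[i+1]+1 if b[i]==b[i+1] else 1)
def bFwd : List Int → List Int
  | [] => []
  | [_] => [1]
  | h :: h' :: t => (if h = h' then (bFwd (h' :: t)).headD 1 + 1 else 1) :: bFwd (h' :: t)

-- main loop: R = last reserved/used index, run = length of the equal-height run ending at i
def bMain (b fwd : List Int) (x : Int) : Int → Int → List Int → Bool
  | _, _, [] => true
  | R, run, i :: is =>
    let d := PySem.List.pyGetD b (i + 1) 0 - PySem.List.pyGetD b i 0
    if d = 0 then bMain b fwd x R (run + 1) is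
    else if d = 1 then
      if run < x ∨ i - x + 1 ≤ R then false else bMain b fwd x i 1 is
    else if d = -1 then
      if PySem.List.pyGetD fwd (i + 1) 0 < x then false else bMain b fwd x (i + x) 1 is
    else false

def check_alt (board : List Int) (n : Int) (x : Int) : Bool :=
  if n ≤ 1 then true
  else
    let b := PySem.List.slice board none (some n)
    bMain b (bFwd b) x (-1) 1 (PySem.List.pyRange 0 (n - 1) 1)

-- ===== PRECONDITION & SPEC =====
-- Pre_ excludes n exceeding the board's length (with n ≥ 2): there the Python A indexes past
-- the end and in general raises IndexError (on a few such inputs a height difference ≥ 2 makes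
-- A return False before reaching the bad index; those inputs are excluded together with the rest).
def Pre_check (board : List Int) (n : Int) (x : Int) : Prop :=
  n ≤ (board.length : Int) ∨ n ≤ 1
instance (board : List Int) (n : Int) (x : Int) : Decidable (Pre_check board n x) := by
  unfold Pre_check; infer_instance

def pvWitness_check : List Int × Int × Int := ([1, 1, 2, 2, 1, 1], 6, 2)

def Spec_check (board : List Int) (n : Int) (x : Int) (out : Bool) : Prop := out = check_alt board n x
instance (board : List Int) (n : Int) (x : Int) (out : Bool) : Decidable (Spec_check board n x out) := by unfold Spec_check; infer_instance

-- ===== CLAIM (what is proved, stated in full; the proofs are below) =====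
def Claim_equal_check : Prop := ∀ (board : List Int) (n : Int) (x : Int), Dom_check board n x → Pre_check board n x → Spec_check board n x (check board n x)

-- ===== LEMMAS AND PROOFS =====

-- out-of-range (to the right) indexing yields the default
lemma pyGetD_oob (l : List Bool) (k : Int) (h : (l.length : Int) ≤ k) :
    PySem.List.pyGetD l k false = false := by
  have hnone : PySem.List.pyGet? l k = none := by
    rw [PySem.List.pyGet?_eq_none_iff]
    intro hr
    simp only [PySem.Raise.InRange] at hr
    omega
  simp only [PySem.List.pyGetD, hnone, Option.getD_none]

-- pyGetD after a set, nonnegative index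
lemma pyGetD_set (l : List Bool) (m : Nat) (hm : m < l.length) (k : Int) (hk : 0 ≤ k) :
    PySem.List.pyGetD (l.set m true) k false
      = if k = (m : Int) then true else PySem.List.pyGetD l k false := by
  by_cases hkl : k < (l.length : Int)
  · rw [PySem.List.pyGetD_eq_getElem _ _ hk (by simpa [List.length_set] using hkl),
        PySem.List.pyGetD_eq_getElem _ _ hk hkl]
    rw [List.getElem_set]
    by_cases he : k = (m : Int)
    · have hm2 : m = k.toNat := by omega
      rw [if_pos hm2, if_pos he]
    · have hm2 : ¬ (m = k.toNat) := by omega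
      rw [if_neg hm2, if_neg he]
  · have h1 : (l.length : Int) ≤ k := by omega
    have e1 : PySem.List.pyGetD (l.set m true) k false = false :=
      pyGetD_oob _ _ (by simpa [List.length_set] using h1)
    have e2 : PySem.List.pyGetD l k false = false := pyGetD_oob _ _ h1
    have hne : ¬ (k = (m : Int)) := by omega
    rw [e1, e2, if_neg hne]

lemma pyGetD_replicate (m : Nat) (k : Int) :
    PySem.List.pyGetD (List.replicate m false) k false = false := by
  cases h : PySem.List.pyGet? (List.replicate m false) k with
  | none => simp only [PySem.List.pyGetD, h, Option.getD_none]
  | some a =>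
    have ha : a ∈ List.replicate m false := PySem.List.mem_of_pyGet?_eq_some _ h
    have he : a = false := List.eq_of_mem_replicate ha
    simp only [PySem.List.pyGetD, h, Option.getD_some, he]

-- length of the initial constant run of a list (spec for bFwd entries)
def runSpec : List Int → Int
  | [] => 0
  | [_] => 1
  | a :: c :: t => if a = c then runSpec (c :: t) + 1 else 1

lemma runSpec_pos (l : List Int) (h : l ≠ []) : 1 ≤ runSpec l := by
  induction l with
  | nil => exact absurd rfl h
  | cons a t ih =>
    cases t with
    | nil => simp [runSpec]
    | cons c t' =>
      simp only [runSpec]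
      split_ifs with hac
      · have := ih (by simp)
        omega
      · omega

lemma runSpec_le_length (l : List Int) : runSpec l ≤ (l.length : Int) := by
  induction l with
  | nil => simp [runSpec]
  | cons a t ih =>
    cases t with
    | nil => simp [runSpec]
    | cons c t' =>
      simp only [runSpec]
      split_ifs with hac
      · simp only [List.length_cons] at ih ⊢
        push_cast at ih ⊢
        omega
      · simp only [List.length_cons]
        push_cast
        omega

lemma runSpec_mem (l : List Int) (u : Nat) (hu : (u : Int) < runSpec l) :
    l.getD u 0 = l.getD 0 0 := by
  induction l generalizing u with
  | nil => simp [List.getD]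
  | cons a t ih =>
    cases t with
    | nil =>
      have : u = 0 := by simp [runSpec] at hu; omega
      rw [this]
    | cons c t' =>
      simp only [runSpec] at hu
      split_ifs at hu with hac
      · cases u with
        | zero => rfl
        | succ v =>
          have h2 : (v : Int) < runSpec (c :: t') := by push_cast at hu; omega
          have hv := ih v h2
          simp only [List.getD_cons_succ, List.getD_cons_zero] at hv ⊢
          rw [hv, hac]
      · have : u = 0 := by omega
        rw [this]

lemma runSpec_end (l : List Int) (h : runSpec l < (l.length : Int)) :
    l.getD (runSpec l).toNat 0 ≠ l.getD 0 0 := by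
  induction l with
  | nil => simp [runSpec] at h
  | cons a t ih =>
    cases t with
    | nil => simp [runSpec] at h
    | cons c t' =>
      simp only [runSpec] at h ⊢
      split_ifs with hac
      · have hpos : 1 ≤ runSpec (c :: t') := runSpec_pos _ (by simp)
        have h2 : runSpec (c :: t') < ((c :: t').length : Int) := by
          simp only [List.length_cons] at h ⊢
          push_cast at h ⊢
          omega
        have ihe := ih h2
        have ht : (runSpec (c :: t') + 1).toNat = (runSpec (c :: t')).toNat + 1 := by omega
        rw [ht]
        simp only [List.getD_cons_succ, List.getD_cons_zero] at ihe ⊢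
        rw [hac]
        simpa [List.getD_cons_zero] using ihe
      · have ht : (1 : Int).toNat = 1 := rfl
        rw [ht]
        simp only [List.getD_cons_succ, List.getD_cons_zero]
        exact fun e => hac e.symm

lemma bFwd_eq (l : List Int) :
    bFwd l = (List.range l.length).map (fun k => runSpec (l.drop k)) := by
  induction l with
  | nil => simp [bFwd]
  | cons a t ih =>
    cases t with
    | nil => simp [bFwd, runSpec]
    | cons c t' =>
      simp only [bFwd]
      rw [ih]
      have hhead : (((List.range (c :: t').length).map (fun k => runSpec ((c :: t').drop k))).headD 1)
          = runSpec (c :: t') := by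
        rw [List.length_cons, List.range_succ_eq_map]
        simp
      rw [hhead]
      have hl1 : (a :: c :: t').length = (c :: t').length + 1 := rfl
      rw [hl1, List.range_succ_eq_map, List.map_cons, List.map_map, List.cons_eq_cons]
      refine ⟨by simp [runSpec], ?_⟩
      apply List.map_congr_left
      intro k _
      simp [Function.comp, List.drop_succ_cons]

-- the loop invariant tying A's visited array to B's (R, run) state at position i
def LoopInv (b : List Int) (n i R run : Int) (visited : List Bool) : Prop :=
  0 ≤ i ∧ i < n ∧ 1 ≤ run ∧ run ≤ i + 1 ∧
  (∀ k : Int, i + 1 - run ≤ k → k ≤ i → PySem.List.pyGetD b k 0 = PySem.List.pyGetD b i 0) ∧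
  (i + 1 - run = 0 ∨ PySem.List.pyGetD b (i - run) 0 ≠ PySem.List.pyGetD b i 0) ∧
  R ≤ n - 1 ∧
  (∀ k : Int, i + 1 - run ≤ k → k < n →
    (PySem.List.pyGetD visited k false = true ↔ k ≤ R)) ∧
  (∀ k : Int, i + 1 - run ≤ k → k ≤ R → PySem.List.pyGetD b k 0 = PySem.List.pyGetD b i 0)

-- failure condition of one uphill iteration (on the original visited array)
def upC (board : List Int) (i : Int) (visited : List Bool) (j : Int) : Prop :=
  i - j < 0 ∨ PySem.List.pyGetD board (i - j) 0 ≠ PySem.List.pyGetD board i 0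
    ∨ PySem.List.pyGetD visited (i - j) false = true

-- failure condition of one downhill iteration
def downC (board : List Int) (n i : Int) (visited : List Bool) (j : Int) : Prop :=
  n ≤ i + 1 + j ∨ PySem.List.pyGetD board (i + 1 + j) 0 ≠ PySem.List.pyGetD board (i + 1) 0
    ∨ PySem.List.pyGetD visited (i + 1 + j) false = true

lemma up_aux (board : List Int) (i x : Int) :
    ∀ (m : Nat) (j0 : Int) (visited : List Bool), (x - j0).toNat = m → 0 ≤ j0 →
      i < (visited.length : Int) →
      ((aUp board i visited (PySem.List.pyRange j0 x 1) = none ↔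
          ∃ j : Int, j0 ≤ j ∧ j < x ∧ upC board i visited j) ∧
       (∀ v', aUp board i visited (PySem.List.pyRange j0 x 1) = some v' →
          v'.length = visited.length ∧
          ∀ k : Int, 0 ≤ k →
            PySem.List.pyGetD v' k false
              = if i - x + 1 ≤ k ∧ k ≤ i - j0 then true else PySem.List.pyGetD visited k false)) := by
  intro m
  induction m with
  | zero =>
    intro j0 visited hm hj0 hlen
    have hx : x ≤ j0 := by omega
    rw [PySem.List.pyRange_one_eq_nil hx]
    constructor
    · constructor
      · intro h; simp [aUp] at h
      · rintro ⟨j, h1, h2, _⟩; omega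
    · intro v' hv'
      simp only [aUp, Option.some.injEq] at hv'
      refine ⟨hv' ▸ rfl, ?_⟩
      intro k hk
      have hno : ¬ (i - x + 1 ≤ k ∧ k ≤ i - j0) := by omega
      rw [if_neg hno, ← hv']
  | succ m' ih =>
    intro j0 visited hm hj0 hlen
    have hlt : j0 < x := by omega
    rw [PySem.List.pyRange_one_cons hlt]
    simp only [aUp]
    by_cases hC : i - j0 < 0 ∨ PySem.List.pyGetD board (i - j0) 0 ≠ PySem.List.pyGetD board i 0
        ∨ PySem.List.pyGetD visited (i - j0) false = true
    · rw [if_pos hC]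
      constructor
      · constructor
        · intro _; exact ⟨j0, le_refl _, hlt, hC⟩
        · intro _; rfl
      · intro v' hv'; exact absurd hv' (by simp)
    · rw [if_neg hC]
      have hij0 : 0 ≤ i - j0 := by
        by_contra hn
        exact hC (Or.inl (by omega))
      have hmem : (i - j0).toNat < visited.length := by omega
      have hset : ∀ k : Int, 0 ≤ k →
          PySem.List.pyGetD (visited.set (i - j0).toNat true) k false
            = if k = i - j0 then true else PySem.List.pyGetD visited k false := by
        intro k hk
        rw [pyGetD_set _ _ hmem _ hk]
        have e : ((i - j0).toNat : Int) = i - j0 := by omega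
        rw [e]
      obtain ⟨ihn, ihs⟩ := ih (j0 + 1) (visited.set (i - j0).toNat true) (by omega) (by omega)
        (by rw [List.length_set]; exact hlen)
      constructor
      · rw [ihn]
        constructor
        · rintro ⟨j, hj1, hj2, hj3⟩
          refine ⟨j, by omega, hj2, ?_⟩
          simp only [upC] at hj3 ⊢
          rcases hj3 with h | h | h
          · exact Or.inl h
          · exact Or.inr (Or.inl h)
          · by_cases hneg : i - j < 0
            · exact Or.inl hneg
            · right; right
              rw [hset (i - j) (by omega)] at h
              rwa [if_neg (by omega : ¬ (i - j = i - j0))] at h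
        · rintro ⟨j, hj1, hj2, hj3⟩
          by_cases hjj : j = j0
          · exact absurd (hjj ▸ hj3) hC
          · refine ⟨j, by omega, hj2, ?_⟩
            simp only [upC] at hj3 ⊢
            rcases hj3 with h | h | h
            · exact Or.inl h
            · exact Or.inr (Or.inl h)
            · by_cases hneg : i - j < 0
              · exact Or.inl hneg
              · right; right
                rw [hset (i - j) (by omega), if_neg (by omega : ¬ (i - j = i - j0))]
                exact h
      · intro v' hv'
        obtain ⟨hl, hchar⟩ := ihs v' hv'
        refine ⟨hl.trans (List.length_set ..), ?_⟩
        intro k hk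
        rw [hchar k hk, hset k hk]
        by_cases h1 : i - x + 1 ≤ k ∧ k ≤ i - (j0 + 1)
        · rw [if_pos h1, if_pos (by omega)]
        · rw [if_neg h1]
          by_cases h2 : k = i - j0
          · rw [if_pos h2, if_pos (by omega)]
          · rw [if_neg h2, if_neg (by omega)]

lemma down_aux (board : List Int) (n i x : Int) (h0 : 0 ≤ i) :
    ∀ (m : Nat) (j0 : Int) (visited : List Bool), (x - j0).toNat = m → 0 ≤ j0 →
      (visited.length : Int) = n →
      ((aDown board n i visited (PySem.List.pyRange j0 x 1) = none ↔
          ∃ j : Int, j0 ≤ j ∧ j < x ∧ downC board n i visited j) ∧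
       (∀ v', aDown board n i visited (PySem.List.pyRange j0 x 1) = some v' →
          v'.length = visited.length ∧
          ∀ k : Int, 0 ≤ k →
            PySem.List.pyGetD v' k false
              = if i + 1 + j0 ≤ k ∧ k ≤ i + x then true else PySem.List.pyGetD visited k false)) := by
  intro m
  induction m with
  | zero =>
    intro j0 visited hm hj0 hlen
    have hx : x ≤ j0 := by omega
    rw [PySem.List.pyRange_one_eq_nil hx]
    constructor
    · constructor
      · intro h; simp [aDown] at h
      · rintro ⟨j, h1, h2, _⟩; omega
    · intro v' hv'
      simp only [aDown, Option.some.injEq] at hv'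
      refine ⟨hv' ▸ rfl, ?_⟩
      intro k hk
      have hno : ¬ (i + 1 + j0 ≤ k ∧ k ≤ i + x) := by omega
      rw [if_neg hno, ← hv']
  | succ m' ih =>
    intro j0 visited hm hj0 hlen
    have hlt : j0 < x := by omega
    rw [PySem.List.pyRange_one_cons hlt]
    simp only [aDown]
    by_cases hC : n ≤ i + 1 + j0 ∨ PySem.List.pyGetD board (i + 1 + j0) 0 ≠ PySem.List.pyGetD board (i + 1) 0
        ∨ PySem.List.pyGetD visited (i + 1 + j0) false = true
    · rw [if_pos hC]
      constructor
      · constructor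
        · intro _; exact ⟨j0, le_refl _, hlt, hC⟩
        · intro _; rfl
      · intro v' hv'; exact absurd hv' (by simp)
    · rw [if_neg hC]
      have hin : i + 1 + j0 < n := by
        by_contra hn'
        exact hC (Or.inl (by omega))
      have hmem : (i + 1 + j0).toNat < visited.length := by omega
      have hset : ∀ k : Int, 0 ≤ k →
          PySem.List.pyGetD (visited.set (i + 1 + j0).toNat true) k false
            = if k = i + 1 + j0 then true else PySem.List.pyGetD visited k false := by
        intro k hk
        rw [pyGetD_set _ _ hmem _ hk]
        have e : ((i + 1 + j0).toNat : Int) = i + 1 + j0 := by omega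
        rw [e]
      obtain ⟨ihn, ihs⟩ := ih (j0 + 1) (visited.set (i + 1 + j0).toNat true) (by omega) (by omega)
        (by rw [List.length_set]; exact hlen)
      constructor
      · rw [ihn]
        constructor
        · rintro ⟨j, hj1, hj2, hj3⟩
          refine ⟨j, by omega, hj2, ?_⟩
          simp only [downC] at hj3 ⊢
          rcases hj3 with h | h | h
          · exact Or.inl h
          · exact Or.inr (Or.inl h)
          · right; right
            rw [hset (i + 1 + j) (by omega)] at h
            rwa [if_neg (by omega : ¬ (i + 1 + j = i + 1 + j0))] at h
        · rintro ⟨j, hj1, hj2, hj3⟩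
          by_cases hjj : j = j0
          · exact absurd (hjj ▸ hj3) hC
          · refine ⟨j, by omega, hj2, ?_⟩
            simp only [downC] at hj3 ⊢
            rcases hj3 with h | h | h
            · exact Or.inl h
            · exact Or.inr (Or.inl h)
            · right; right
              rw [hset (i + 1 + j) (by omega), if_neg (by omega : ¬ (i + 1 + j = i + 1 + j0))]
              exact h
      · intro v' hv'
        obtain ⟨hl, hchar⟩ := ihs v' hv'
        refine ⟨hl.trans (List.length_set ..), ?_⟩
        intro k hk
        rw [hchar k hk, hset k hk]
        by_cases h1 : i + 1 + (j0 + 1) ≤ k ∧ k ≤ i + x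
        · rw [if_pos h1, if_pos (by omega)]
        · rw [if_neg h1]
          by_cases h2 : k = i + 1 + j0
          · rw [if_pos h2, if_pos (by omega)]
          · rw [if_neg h2, if_neg (by omega)]

-- main simulation: A's loop with its visited array = B's loop with (R, run), under Inv
lemma main_step (board b fwd : List Int) (n x : Int)
    (hb : (b.length : Int) = n)
    (hagree : ∀ k : Int, 0 ≤ k → k < n →
      PySem.List.pyGetD board k 0 = PySem.List.pyGetD b k 0)
    (hfwd : fwd = bFwd b) :
    ∀ (m : Nat) (i R run : Int) (visited : List Bool), (n - 1 - i).toNat = m →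
      (visited.length : Int) = n → LoopInv b n i R run visited →
      aMain board n x visited (PySem.List.pyRange i (n - 1) 1) =
      bMain b fwd x R run (PySem.List.pyRange i (n - 1) 1) := by
  intro m
  induction m with
  | zero =>
    intro i R run visited hm hlen hInv
    rw [PySem.List.pyRange_one_eq_nil (by omega)]
    simp [aMain, bMain]
  | succ m' ih =>
    intro i R run visited hm hlen hInv
    obtain ⟨hi0, hin, hrun1, hrun2, hcells, hmax, hRn, hiff, hmarks⟩ := hInv
    have hlt : i < n - 1 := by omega
    have hm'' : (n - 1 - (i + 1)).toNat = m' := by omega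
    rw [PySem.List.pyRange_one_cons hlt]
    simp only [aMain, bMain]
    have hg0 : PySem.List.pyGetD board i 0 = PySem.List.pyGetD b i 0 :=
      hagree i hi0 (by omega)
    have hg1 : PySem.List.pyGetD board (i + 1) 0 = PySem.List.pyGetD b (i + 1) 0 :=
      hagree (i + 1) (by omega) (by omega)
    rw [hg0, hg1]
    by_cases habs : 2 ≤ (PySem.List.pyGetD b i 0 - PySem.List.pyGetD b (i + 1) 0).natAbs
    · rw [if_pos habs]
      have hz : ¬ (PySem.List.pyGetD b (i + 1) 0 - PySem.List.pyGetD b i 0 = 0) := by omega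
      have ho : ¬ (PySem.List.pyGetD b (i + 1) 0 - PySem.List.pyGetD b i 0 = 1) := by omega
      have hmo : ¬ (PySem.List.pyGetD b (i + 1) 0 - PySem.List.pyGetD b i 0 = -1) := by omega
      rw [if_neg hz, if_neg ho, if_neg hmo]
    · rw [if_neg habs]
      by_cases hdeq : PySem.List.pyGetD b i 0 = PySem.List.pyGetD b (i + 1) 0
      · -- flat step
        have hA1 : ¬ (PySem.List.pyGetD b i 0 < PySem.List.pyGetD b (i + 1) 0) := by omega
        have hA2 : ¬ (PySem.List.pyGetD b (i + 1) 0 < PySem.List.pyGetD b i 0) := by omega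
        have hB0 : PySem.List.pyGetD b (i + 1) 0 - PySem.List.pyGetD b i 0 = 0 := by omega
        rw [if_neg hA1, if_neg hA2, if_pos hB0]
        apply ih (i + 1) R (run + 1) visited hm'' hlen
        refine ⟨by omega, by omega, by omega, by omega, ?_, ?_, hRn, ?_, ?_⟩
        · intro k h1 h2
          by_cases hk : k = i + 1
          · rw [hk]
          · rw [← hdeq]
            exact hcells k (by omega) (by omega)
        · have e : i + 1 + 1 - (run + 1) = i + 1 - run := by ring
          have e2 : i + 1 - (run + 1) = i - run := by ring
          rw [e, e2, ← hdeq]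
          exact hmax
        · intro k h1 h2
          exact hiff k (by omega) h2
        · intro k h1 h2
          rw [← hdeq]
          exact hmarks k (by omega) h2
      · by_cases hdup : PySem.List.pyGetD b i 0 + 1 = PySem.List.pyGetD b (i + 1) 0
        · -- uphill step
          have hAup : PySem.List.pyGetD b i 0 < PySem.List.pyGetD b (i + 1) 0 := by omega
          have hBz : ¬ (PySem.List.pyGetD b (i + 1) 0 - PySem.List.pyGetD b i 0 = 0) := by omega
          have hBo : PySem.List.pyGetD b (i + 1) 0 - PySem.List.pyGetD b i 0 = 1 := by omega
          rw [if_pos hAup]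
          have hRi : R ≤ i := by
            by_contra hR
            have h1 := hmarks (i + 1) (by omega) (by omega)
            rw [h1] at hdup
            omega
          obtain ⟨uiff, uchar⟩ := up_aux board i x (x - 0).toNat 0 visited rfl (le_refl 0)
            (by rw [hlen]; omega)
          have keyiff : (∃ j : Int, 0 ≤ j ∧ j < x ∧ upC board i visited j) ↔
              (run < x ∨ i - x + 1 ≤ R) := by
            constructor
            · rintro ⟨j, hj0, hjx, hC⟩
              by_cases hrx : run < x
              · exact Or.inl hrx
              · right
                simp only [upC] at hC
                rcases hC with h | h | h
                · omega
                · exfalso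
                  have e1 : PySem.List.pyGetD board (i - j) 0 = PySem.List.pyGetD b (i - j) 0 :=
                    hagree _ (by omega) (by omega)
                  have e2 := hcells (i - j) (by omega) (by omega)
                  rw [e1, e2, hg0] at h
                  exact h rfl
                · have := (hiff (i - j) (by omega) (by omega)).mp h
                  omega
            · intro hfb
              by_cases hrx : run < x
              · refine ⟨run, by omega, hrx, ?_⟩
                simp only [upC]
                by_cases hs : i - run < 0
                · exact Or.inl hs
                · right; left
                  rcases hmax with hL | hR
                  · exact absurd hL (by omega)
                  · have e1 : PySem.List.pyGetD board (i - run) 0 = PySem.List.pyGetD b (i - run) 0 :=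
                      hagree _ (by omega) (by omega)
                    rw [e1, hg0]
                    exact hR
              · have hRx : i - x + 1 ≤ R := by
                  rcases hfb with h | h
                  · exact absurd h hrx
                  · exact h
                have hx1 : 1 ≤ x := by
                  by_contra hx0
                  have h1 := hmarks (i + 1) (by omega) (by omega)
                  rw [h1] at hdup
                  omega
                refine ⟨x - 1, by omega, by omega, ?_⟩
                simp only [upC]
                right; right
                have hk : i - (x - 1) = i - x + 1 := by ring
                rw [hk]
                exact (hiff (i - x + 1) (by omega) (by omega)).mpr (by omega)
          cases hres : aUp board i visited (PySem.List.pyRange 0 x 1) with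
          | none =>
            have hfail : run < x ∨ i - x + 1 ≤ R := keyiff.mp (uiff.mp hres)
            rw [if_neg hBz, if_pos hBo, if_pos hfail]
          | some v' =>
            have hok : ¬ (run < x ∨ i - x + 1 ≤ R) := by
              intro h
              have := uiff.mpr (keyiff.mpr h)
              rw [hres] at this
              simp at this
            obtain ⟨hvl, hvchar⟩ := uchar v' hres
            rw [if_neg hBz, if_pos hBo, if_neg hok]
            apply ih (i + 1) i 1 v' hm'' (by rw [hvl]; exact hlen)
            refine ⟨by omega, by omega, le_refl 1, by omega, ?_, ?_, by omega, ?_, ?_⟩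
            · intro k h1 h2
              have : k = i + 1 := by omega
              rw [this]
            · right
              have e : i + 1 - 1 = i := by ring
              rw [e]
              intro h
              rw [h] at hdup
              omega
            · intro k h1 h2
              rw [hvchar k (by omega), if_neg (by omega)]
              constructor
              · intro hv
                have := (hiff k (by omega) h2).mp hv
                omega
              · intro h
                exact absurd h (by omega)
            · intro k h1 h2
              exact absurd h2 (by omega)
        · -- downhill step
          have hddown : PySem.List.pyGetD b (i + 1) 0 + 1 = PySem.List.pyGetD b i 0 := by omega
          have hA1 : ¬ (PySem.List.pyGetD b i 0 < PySem.List.pyGetD b (i + 1) 0) := by omega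
          have hA2 : PySem.List.pyGetD b (i + 1) 0 < PySem.List.pyGetD b i 0 := by omega
          have hBz : ¬ (PySem.List.pyGetD b (i + 1) 0 - PySem.List.pyGetD b i 0 = 0) := by omega
          have hBo : ¬ (PySem.List.pyGetD b (i + 1) 0 - PySem.List.pyGetD b i 0 = 1) := by omega
          have hBm : PySem.List.pyGetD b (i + 1) 0 - PySem.List.pyGetD b i 0 = -1 := by omega
          rw [if_neg hA1, if_pos hA2]
          have hRi : R ≤ i := by
            by_contra hR
            have h1 := hmarks (i + 1) (by omega) (by omega)
            rw [h1] at hddown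
            omega
          obtain ⟨diff, dchar⟩ := down_aux board n i x hi0 (x - 0).toNat 0 visited rfl (le_refl 0) hlen
          have hfwdval : PySem.List.pyGetD fwd (i + 1) 0 = runSpec (b.drop (i + 1).toNat) := by
            rw [hfwd, bFwd_eq]
            rw [PySem.List.pyGetD_eq_getElem _ _ (by omega)
              (by simp only [List.length_map, List.length_range]; omega)]
            rw [List.getElem_map, List.getElem_range]
          have hDlen : ((b.drop (i + 1).toNat).length : Int) = n - (i + 1) := by
            simp only [List.length_drop]
            omega
          have hDne : b.drop (i + 1).toNat ≠ [] := by
            intro h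
            rw [h] at hDlen
            simp at hDlen
            omega
          have hrpos : 1 ≤ runSpec (b.drop (i + 1).toNat) := runSpec_pos _ hDne
          have hrlen : runSpec (b.drop (i + 1).toNat) ≤ ((b.drop (i + 1).toNat).length : Int) :=
            runSpec_le_length _
          have gIdrop : ∀ u : Nat, (b.drop (i + 1).toNat).getD u 0
              = PySem.List.pyGetD b (i + 1 + (u : Int)) 0 := by
            intro u
            have e : (i + 1 + (u : Int)) = (((i + 1).toNat + u : Nat) : Int) := by push_cast; omega
            rw [e, PySem.List.pyGetD_natCast]
            simp [List.getD_eq_getElem?_getD, List.getElem?_drop]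
          have keyiff2 : (∃ j : Int, 0 ≤ j ∧ j < x ∧ downC board n i visited j) ↔
              runSpec (b.drop (i + 1).toNat) < x := by
            constructor
            · rintro ⟨j, hj0, hjx, hC⟩
              by_contra hnr
              have hjr : j < runSpec (b.drop (i + 1).toNat) := by omega
              have hjb : i + 1 + j < n := by omega
              simp only [downC] at hC
              rcases hC with h | h | h
              · omega
              · have hm1 := runSpec_mem (b.drop (i + 1).toNat) j.toNat (by omega)
                rw [gIdrop j.toNat, gIdrop 0] at hm1
                have e1 : i + 1 + (j.toNat : Int) = i + 1 + j := by omega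
                have e2 : i + 1 + ((0 : Nat) : Int) = i + 1 := by norm_num
                rw [e1, e2] at hm1
                have e3 : PySem.List.pyGetD board (i + 1 + j) 0 = PySem.List.pyGetD b (i + 1 + j) 0 :=
                  hagree _ (by omega) (by omega)
                rw [e3, hg1] at h
                exact h hm1
              · have := (hiff (i + 1 + j) (by omega) (by omega)).mp h
                omega
            · intro hrx
              by_cases hend2 : runSpec (b.drop (i + 1).toNat) = ((b.drop (i + 1).toNat).length : Int)
              · refine ⟨runSpec (b.drop (i + 1).toNat), by omega, hrx, ?_⟩
                simp only [downC]
                left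
                omega
              · have hrD : runSpec (b.drop (i + 1).toNat) < ((b.drop (i + 1).toNat).length : Int) := by
                  omega
                refine ⟨runSpec (b.drop (i + 1).toNat), by omega, hrx, ?_⟩
                simp only [downC]
                right; left
                have he := runSpec_end _ hrD
                rw [gIdrop ((runSpec (b.drop (i + 1).toNat)).toNat), gIdrop 0] at he
                have e1 : i + 1 + ((runSpec (b.drop (i + 1).toNat)).toNat : Int)
                    = i + 1 + runSpec (b.drop (i + 1).toNat) := by omega
                have e2 : i + 1 + ((0 : Nat) : Int) = i + 1 := by norm_num
                rw [e1, e2] at he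
                have e3 : PySem.List.pyGetD board (i + 1 + runSpec (b.drop (i + 1).toNat)) 0
                    = PySem.List.pyGetD b (i + 1 + runSpec (b.drop (i + 1).toNat)) 0 :=
                  hagree _ (by omega) (by omega)
                rw [e3, hg1]
                exact he
          cases hres : aDown board n i visited (PySem.List.pyRange 0 x 1) with
          | none =>
            have hfail : runSpec (b.drop (i + 1).toNat) < x := keyiff2.mp (diff.mp hres)
            rw [if_neg hBz, if_neg hBo, if_pos hBm, hfwdval, if_pos hfail]
          | some v' =>
            have hnr : ¬ runSpec (b.drop (i + 1).toNat) < x := by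
              intro h
              have := diff.mpr (keyiff2.mpr h)
              rw [hres] at this
              simp at this
            obtain ⟨hvl, hvchar⟩ := dchar v' hres
            rw [if_neg hBz, if_neg hBo, if_pos hBm, hfwdval, if_neg hnr]
            apply ih (i + 1) (i + x) 1 v' hm'' (by rw [hvl]; exact hlen)
            refine ⟨by omega, by omega, le_refl 1, by omega, ?_, ?_, by omega, ?_, ?_⟩
            · intro k h1 h2
              have : k = i + 1 := by omega
              rw [this]
            · right
              have e : i + 1 - 1 = i := by ring
              rw [e]
              intro h
              rw [h] at hddown
              omega
            · intro k h1 h2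
              rw [hvchar k (by omega)]
              by_cases hk : k ≤ i + x
              · rw [if_pos ⟨by omega, hk⟩]
                simp [hk]
              · rw [if_neg (by omega)]
                constructor
                · intro hv
                  have := (hiff k (by omega) h2).mp hv
                  omega
                · intro hkk
                  exact absurd hkk hk
            · intro k h1 h2
              have hu : ((k - (i + 1)).toNat : Int) < runSpec (b.drop (i + 1).toNat) := by omega
              have hm2 := runSpec_mem (b.drop (i + 1).toNat) (k - (i + 1)).toNat hu
              rw [gIdrop, gIdrop] at hm2
              have e1 : i + 1 + (((k - (i + 1)).toNat) : Int) = k := by omega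
              have e2 : i + 1 + ((0 : Nat) : Int) = i + 1 := by norm_num
              rw [e1, e2] at hm2
              exact hm2

-- ===== VERDICT (by name: the statement is the Claim_ definition above) =====
theorem check_spec : Claim_equal_check := by
  intro board n x _ hpre
  show check board n x = check_alt board n x
  by_cases hn : n ≤ 1
  · rw [check, check_alt]
    rw [PySem.List.pyRange_one_eq_nil (by omega : n - 1 ≤ 0)]
    simp [aMain, hn]
  · have hnb : n ≤ (board.length : Int) := by
      rcases hpre with h | h
      · exact h
      · omega
    rw [check, check_alt, if_neg hn]
    have hbt : PySem.List.slice board none (some n) = board.take n.toNat :=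
      PySem.List.slice_to board (by omega : (0 : Int) ≤ n)
    have hblen : ((PySem.List.slice board none (some n)).length : Int) = n := by
      rw [hbt]
      simp only [List.length_take]
      omega
    have hagree : ∀ k : Int, 0 ≤ k → k < n →
        PySem.List.pyGetD board k 0 = PySem.List.pyGetD (PySem.List.slice board none (some n)) k 0 := by
      intro k h1 h2
      have e : k = ((k.toNat : Nat) : Int) := by omega
      rw [e, PySem.List.pyGetD_natCast, PySem.List.pyGetD_natCast, hbt]
      rw [List.getD_eq_getElem?_getD, List.getD_eq_getElem?_getD]
      rw [List.getElem?_take_of_lt (by omega)]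
    have hrepl : ((List.replicate n.toNat false).length : Int) = n := by
      simp only [List.length_replicate]
      omega
    apply main_step board (PySem.List.slice board none (some n))
      (bFwd (PySem.List.slice board none (some n))) n x hblen hagree rfl
      (n - 1 - 0).toNat 0 (-1) 1 (List.replicate n.toNat false) rfl hrepl
    refine ⟨le_refl 0, by omega, le_refl 1, by omega, ?_, Or.inl (by norm_num), by omega, ?_, ?_⟩
    · intro k h1 h2
      have : k = 0 := by omega
      rw [this]
    · intro k h1 h2
      rw [pyGetD_replicate]
      constructor
      · intro h
        exact absurd h (by simp)
      · intro h
        exact absurd h (by omega)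
    · intro k h1 h2
      exact absurd h2 (by omega)
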